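-- pv_equiv track=rewrite | github.com/gkazunii/pymba | src/.ipynb_checkpoints/manage_intract-checkpoint.py | get_intract_CP
-- ===== SOURCE A (Python) =====
-- import itertools
-- import math
-- import math
-- import itertools
--
-- def get_intract_CP(D):
--     """
--     Generate an interaction specification (intract) that includes:
--     - All 1-body interactions
--     - Only 2-body interactions between the last axis (D-1) and all others
--     - No higher-order interactions
--
--     Parameters
--     ----------
--     D : int
--         Number of dimensions (tensor order)
--
--     Returns
--     -------
--     intract : list of list of int
--         Interaction specification as a list of binary vectors for 1-body to D-body interactions.
--         Each entry in the outer list corresponds to d-body interactions (d = 1 to D).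
--     """
--     intract = []
--
--     # 1-body: all active
--     intract.append([1] * D)
--
--     # 2-body: activate only those involving the last axis (D-1)
--     combs_2 = list(itertools.combinations(range(D), 2))
--     intract_2 = [1 if (D - 1) in comb else 0 for comb in combs_2]
--     intract.append(intract_2)
--
--     # Higher-order: all inactive
--     for d in range(3, D + 1):
--         intract.append([0] * math.comb(D, d))
--
--     return intract
-- ===== SOURCE B (Python) =====
-- import itertools
--
-- def get_intract_CP(D):
--     # One uniform rule: a combination is active iff it is 1-body, or 2-body touching
--     # the last axis. The 1-body and 2-body blocks are always present (hence the max).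
--     intract = []
--     for d in range(1, max(D + 1, 3)):
--         combs = itertools.combinations(range(D), d)
--         intract.append([1 if (d == 1 or (d == 2 and (D - 1) in comb)) else 0
--                         for comb in combs])
--     return intract
-- ===== Notes on version B (the rewrite author's own statement) =====
-- stated objective: alternative
-- what changed: One uniform loop over the interaction order d applying a single activation rule per enumerated combination (itertools.combinations(range(D), d)), replacing A's three special-cased constructions: the literal [1]*D row, the dedicated 2-body comprehension, and the math.comb closed-form zero-row lengths.
import Mathlib
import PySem

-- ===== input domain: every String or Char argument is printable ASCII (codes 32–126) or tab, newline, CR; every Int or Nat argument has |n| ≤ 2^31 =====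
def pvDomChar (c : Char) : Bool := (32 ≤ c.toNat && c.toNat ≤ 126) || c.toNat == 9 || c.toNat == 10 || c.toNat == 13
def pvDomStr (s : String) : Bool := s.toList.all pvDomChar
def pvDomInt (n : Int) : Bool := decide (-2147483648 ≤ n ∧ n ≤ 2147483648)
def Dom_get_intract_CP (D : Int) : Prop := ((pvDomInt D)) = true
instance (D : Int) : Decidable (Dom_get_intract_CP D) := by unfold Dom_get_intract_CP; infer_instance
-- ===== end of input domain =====

-- B replaces A's three special-cased row constructions (literal 1-row, dedicated 2-body
-- comprehension, math.comb zero-row lengths) by one uniform loop applying a single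
-- activation rule to every enumerated combination. Objective: alternative; no speed claim.

-- ===== PORT A =====
-- itertools.combinations(xs, 2) as a list of pairs, in itertools order (exact)
def pvPairsOf : List Int → List (Int × Int)
  | [] => []
  | x :: rest => rest.map (fun y => (x, y)) ++ pvPairsOf rest

def get_intract_CP (D : Int) : List (List Int) :=
  -- intract = []; intract.append([1]*D)
  let row1 : List Int := List.replicate D.toNat 1
  -- combs_2 = list(itertools.combinations(range(D), 2)); intract_2 = [...]
  let combs2 := pvPairsOf (PySem.List.pyRange 0 D 1)
  let row2 : List Int := combs2.map (fun c => if c.1 = D - 1 ∨ c.2 = D - 1 then 1 else 0)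
  -- for d in range(3, D+1): intract.append([0] * math.comb(D, d))
  (PySem.List.pyRange 3 (D + 1) 1).foldl
    (fun acc d => acc ++ [List.replicate (Nat.choose D.toNat d.toNat) (0 : Int)])
    [row1, row2]

-- ===== PORT B =====
-- itertools.combinations(xs, k) as a list of lists, in itertools order (exact)
def pvCombos : Nat → List Int → List (List Int)
  | 0, _ => [[]]
  | _ + 1, [] => []
  | k + 1, x :: rest => (pvCombos k rest).map (fun c => x :: c) ++ pvCombos (k + 1) rest

def get_intract_CP_alt (D : Int) : List (List Int) :=
  -- for d in range(1, max(D + 1, 3)): intract.append([rule per combination])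
  (PySem.List.pyRange 1 (max (D + 1) 3) 1).foldl
    (fun acc d =>
      acc ++ [(pvCombos d.toNat (PySem.List.pyRange 0 D 1)).map
        (fun comb => if d = 1 ∨ (d = 2 ∧ (D - 1) ∈ comb) then (1 : Int) else 0)])
    []

-- ===== PRECONDITION & SPEC =====
def Spec_get_intract_CP (D : Int) (out : List (List Int)) : Prop := out = get_intract_CP_alt D
instance (D : Int) (out : List (List Int)) : Decidable (Spec_get_intract_CP D out) := by
  unfold Spec_get_intract_CP; infer_instance

-- ===== CLAIM =====
def Claim_equal_get_intract_CP : Prop :=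
  ∀ (D : Int), Dom_get_intract_CP D → Spec_get_intract_CP D (get_intract_CP D)

-- ===== LEMMAS AND PROOFS =====

-- the append-one-row foldl is just map
theorem pv_foldl_append_map {α : Type} (g : α → List Int) :
    ∀ (l : List α) (acc : List (List Int)),
      l.foldl (fun a d => a ++ [g d]) acc = acc ++ l.map g := by
  intro l
  induction l with
  | nil => intro acc; simp
  | cons x xs ih => intro acc; simp [List.foldl, ih]

theorem pv_combos_one (xs : List Int) : pvCombos 1 xs = xs.map (fun x => [x]) := by
  induction xs with
  | nil => rfl
  | cons x rest ih => simp [pvCombos, ih]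

theorem pv_combos_two (xs : List Int) :
    pvCombos 2 xs = (pvPairsOf xs).map (fun p => [p.1, p.2]) := by
  induction xs with
  | nil => rfl
  | cons x rest ih =>
    simp [pvCombos, pvPairsOf, ih, pv_combos_one, Function.comp]

theorem pv_combos_length : ∀ (xs : List Int) (k : Nat),
    (pvCombos k xs).length = Nat.choose xs.length k := by
  intro xs
  induction xs with
  | nil => intro k; cases k <;> simp [pvCombos]
  | cons x rest ih =>
    intro k
    cases k with
    | zero => simp [pvCombos]
    | succ k => simp [pvCombos, ih, Nat.choose_succ_succ]

-- B's loop range is always [1, 2] followed by the higher orders 3..D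
theorem pv_alt_range (D : Int) :
    PySem.List.pyRange 1 (max (D + 1) 3) 1 = 1 :: 2 :: PySem.List.pyRange 3 (D + 1) 1 := by
  rw [PySem.List.pyRange_one_cons (by omega : (1:Int) < max (D + 1) 3)]
  rw [PySem.List.pyRange_one_cons (by omega : (1:Int) + 1 < max (D + 1) 3)]
  norm_num
  rcases le_or_gt D 1 with h | h
  · have hm : max (D + 1) 3 = 3 := by omega
    rw [hm, PySem.List.pyRange_one_eq_nil (by omega : (3:Int) ≤ 3),
        PySem.List.pyRange_one_eq_nil (by omega : D + 1 ≤ 3)]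
  · have hm : max (D + 1) 3 = D + 1 := by omega
    rw [hm]

theorem get_intract_CP_spec : Claim_equal_get_intract_CP := by
  intro D _
  unfold Spec_get_intract_CP
  symm
  unfold get_intract_CP_alt
  rw [pv_alt_range, pv_foldl_append_map]
  unfold get_intract_CP
  rw [pv_foldl_append_map]
  simp only [List.map_cons, List.cons_append, List.nil_append]
  refine congrArg₂ _ ?_ (congrArg₂ _ ?_ ?_)
  · -- d = 1 row: all ones, length D.toNat
    simp only [show ((1:Int)).toNat = 1 from rfl, pv_combos_one, List.map_map]
    trans (List.map (fun _ : Int => (1:Int)) (PySem.List.pyRange 0 D 1))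
    · apply List.map_congr_left; intro x _; simp
    · rw [List.map_const']; simp [PySem.List.length_pyRange_one]
  · -- d = 2 row
    simp only [show ((2:Int)).toNat = 2 from rfl, pv_combos_two, List.map_map]
    apply List.map_congr_left
    intro p _
    simp only [Function.comp]
    have : ((D - 1) ∈ [p.1, p.2]) ↔ (p.1 = D - 1 ∨ p.2 = D - 1) := by
      simp [eq_comm]
    by_cases h : p.1 = D - 1 ∨ p.2 = D - 1 <;> simp [this, h]
  · -- d ≥ 3 rows: all zeros of length choose D d
    apply List.map_congr_left
    intro d hd
    rw [PySem.List.mem_pyRange_one] at hd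
    have hcond : ∀ comb : List Int, (if d = 1 ∨ (d = 2 ∧ (D - 1) ∈ comb) then (1:Int) else 0) = 0 := by
      intro comb
      have : ¬ (d = 1 ∨ (d = 2 ∧ (D - 1) ∈ comb)) := by
        rintro (h | ⟨h, _⟩) <;> omega
      simp [this]
    calc (pvCombos d.toNat (PySem.List.pyRange 0 D 1)).map
          (fun comb => if d = 1 ∨ (d = 2 ∧ (D - 1) ∈ comb) then (1:Int) else 0)
        = (pvCombos d.toNat (PySem.List.pyRange 0 D 1)).map (fun _ => (0:Int)) := by
          apply List.map_congr_left; intro c _; exact hcond c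
      _ = List.replicate (Nat.choose D.toNat d.toNat) (0:Int) := by
          rw [List.map_const', pv_combos_length]
          simp [PySem.List.length_pyRange_one]
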